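-- pv_equiv track=rewrite | github.com/tosurajitc/mortgage-lending-mvp | src/security/middleware.py | _match_route_pattern
-- ===== SOURCE A (Python) =====
-- def _match_route_pattern(path: str, pattern: str) -> bool:
--     """
--     Match a path against a route pattern with parameters.
--
--     Args:
--         path: The actual request path
--         pattern: The route pattern with parameters
--
--     Returns:
--         True if the path matches the pattern
--     """
--     # Convert pattern to parts and normalize
--     pattern_parts = pattern.strip('/').split('/')
--     path_parts = path.strip('/').split('/')
--
--     # Different number of parts means no match
--     if len(pattern_parts) != len(path_parts):
--         return False
--
--     # Check each part
--     for pattern_part, path_part in zip(pattern_parts, path_parts):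
--         # Parameter part (e.g., {application_id}) matches anything
--         if pattern_part.startswith('{') and pattern_part.endswith('}'):
--             continue
--         # Literal part must match exactly
--         elif pattern_part != path_part:
--             return False
--
--     return True
-- ===== SOURCE B (Python) =====
-- def _match_route_pattern(path: str, pattern: str) -> bool:
--     """Simultaneous recursion over both segment lists: no length pre-check,
--     no zip -- exhausting both lists together is the match."""
--     def go(pats, segs):
--         if not pats and not segs:
--             return True
--         if not pats or not segs:
--             return False
--         p = pats[0]
--         if (p.startswith('{') and p.endswith('}')) or p == segs[0]:
--             return go(pats[1:], segs[1:])
--         return False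
--     return go(pattern.strip('/').split('/'), path.strip('/').split('/'))
-- ===== Notes on version B (the rewrite author's own statement) =====
-- stated objective: alternative
-- what changed: Replaced A's explicit length check plus zip-and-loop with a single simultaneous recursion over the two segment lists that enforces equal length structurally (no zip, no len comparison).
import Mathlib
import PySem

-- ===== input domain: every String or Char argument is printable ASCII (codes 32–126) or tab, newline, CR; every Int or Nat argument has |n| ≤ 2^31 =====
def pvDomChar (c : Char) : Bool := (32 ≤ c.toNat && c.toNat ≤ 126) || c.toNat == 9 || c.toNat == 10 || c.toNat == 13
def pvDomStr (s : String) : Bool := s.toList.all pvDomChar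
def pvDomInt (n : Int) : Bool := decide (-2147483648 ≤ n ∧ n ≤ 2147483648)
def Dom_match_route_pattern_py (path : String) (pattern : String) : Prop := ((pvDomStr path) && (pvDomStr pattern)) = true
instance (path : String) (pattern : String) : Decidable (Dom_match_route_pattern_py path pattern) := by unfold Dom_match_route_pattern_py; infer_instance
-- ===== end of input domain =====

-- B replaces A's explicit length check plus zip-and-loop with one simultaneous
-- recursion over the two segment lists (objective: alternative decomposition).

-- ===== PORT A =====
-- the 'for pattern_part, path_part in zip(...)' loop with its early returns
def pvLoopA : List (List Char × List Char) → Bool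
  | [] => true
  | (pattern_part, path_part) :: rest =>
      if PySem.Chars.startswith pattern_part ['{'] && PySem.Chars.endswith pattern_part ['}'] then
        pvLoopA rest
      else if pattern_part ≠ path_part then false
      else pvLoopA rest

def match_route_pattern_py (path : String) (pattern : String) : Bool :=
  let pattern_parts := PySem.Chars.splitOn (PySem.Str.stripChars pattern "/").toList ['/']
  let path_parts := PySem.Chars.splitOn (PySem.Str.stripChars path "/").toList ['/']
  if pattern_parts.length ≠ path_parts.length then false
  else pvLoopA (pattern_parts.zip path_parts)

-- ===== PORT B =====
-- Source B's inner 'go': simultaneous recursion on both segment lists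
def pvGoB : List (List Char) → List (List Char) → Bool
  | [], [] => true
  | [], _ :: _ => false
  | _ :: _, [] => false
  | p :: pats, s :: segs =>
      if (PySem.Chars.startswith p ['{'] && PySem.Chars.endswith p ['}']) || p == s then
        pvGoB pats segs
      else false

def match_route_pattern_py_alt (path : String) (pattern : String) : Bool :=
  pvGoB (PySem.Chars.splitOn (PySem.Str.stripChars pattern "/").toList ['/'])
        (PySem.Chars.splitOn (PySem.Str.stripChars path "/").toList ['/'])

-- ===== PRECONDITION & SPEC =====
def Spec_match_route_pattern_py (path : String) (pattern : String) (out : Bool) : Prop := out = match_route_pattern_py_alt path pattern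
instance (path : String) (pattern : String) (out : Bool) : Decidable (Spec_match_route_pattern_py path pattern out) := by unfold Spec_match_route_pattern_py; infer_instance

-- ===== CLAIM (what is proved, stated in full; the proofs are below) =====
def Claim_equal_match_route_pattern_py : Prop := ∀ (path : String) (pattern : String), Dom_match_route_pattern_py path pattern → Spec_match_route_pattern_py path pattern (match_route_pattern_py path pattern)

-- ===== LEMMAS AND PROOFS =====
lemma pvLoop_eq_go (ps : List (List Char)) : ∀ qs : List (List Char),
    (if ps.length ≠ qs.length then false else pvLoopA (ps.zip qs)) = pvGoB ps qs := by
  induction ps with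
  | nil =>
      intro qs
      cases qs with
      | nil => simp [pvLoopA, pvGoB]
      | cons q qs => simp [pvGoB]
  | cons p ps ih =>
      intro qs
      cases qs with
      | nil => simp [pvGoB]
      | cons q qs =>
          have ih' := ih qs
          by_cases hl : ps.length = qs.length
          · simp only [List.length_cons, ne_eq, hl, not_true_eq_false, if_false,
              List.zip_cons_cons, pvLoopA, pvGoB]
            by_cases hw : (PySem.Chars.startswith p ['{'] && PySem.Chars.endswith p ['}']) = true
            · simp only [hw, if_true, Bool.true_or]
              simpa [hl] using ih'
            · simp only [hw, Bool.false_or]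
              by_cases hpq : p = q
              · simp only [hpq, not_true_eq_false, if_false, beq_self_eq_true, if_true]
                simpa [hl] using ih'
              · simp [hpq]
          · have hgo : pvGoB ps qs = false := by
              rw [← ih']; simp [hl]
            simp only [List.length_cons, ne_eq, Nat.add_right_cancel_iff, hl,
              not_false_eq_true, if_true, pvGoB, hgo]
            split <;> rfl

-- ===== VERDICT (by name: the statement is the Claim_ definition above) =====
theorem match_route_pattern_py_spec : Claim_equal_match_route_pattern_py := by
  intro path pattern _
  unfold Spec_match_route_pattern_py match_route_pattern_py match_route_pattern_py_alt
  exact pvLoop_eq_go _ _
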